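-- pv_equiv track=rewrite | github.com/showwin/AtCoder | agc003/B.py | word_sort
-- ===== SOURCE A (Python) =====
-- def word_sort(w1, w2):
--     min_len = min(len(w1), len(w2))
--     for i in range(min_len):
--         idx = -i - 1
--         if w1[idx] == w2[idx] and (i + 1 == min_len):
--             if len(w1) < len(w2):
--                 return 1
--             else:
--                 return 2
--         if w1[idx] == w2[idx]:
--             continue
--         if w1[idx] < w2[idx]:
--             return 1
--         else:
--             return 2
-- ===== SOURCE B (Python) =====
-- def word_sort(w1, w2):
--     if min(len(w1), len(w2)) == 0:
--         return None
--     return 1 if w1[::-1] < w2[::-1] else 2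
-- ===== Notes on version B (the rewrite author's own statement) =====
-- stated objective: idiomatic
-- what changed: Replaces the hand-written end-to-front index loop with its manual tie/length branching by reversing both words and a single built-in lexicographic string comparison (with a guard returning None when either word is empty, matching A's fall-through).
import Mathlib
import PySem

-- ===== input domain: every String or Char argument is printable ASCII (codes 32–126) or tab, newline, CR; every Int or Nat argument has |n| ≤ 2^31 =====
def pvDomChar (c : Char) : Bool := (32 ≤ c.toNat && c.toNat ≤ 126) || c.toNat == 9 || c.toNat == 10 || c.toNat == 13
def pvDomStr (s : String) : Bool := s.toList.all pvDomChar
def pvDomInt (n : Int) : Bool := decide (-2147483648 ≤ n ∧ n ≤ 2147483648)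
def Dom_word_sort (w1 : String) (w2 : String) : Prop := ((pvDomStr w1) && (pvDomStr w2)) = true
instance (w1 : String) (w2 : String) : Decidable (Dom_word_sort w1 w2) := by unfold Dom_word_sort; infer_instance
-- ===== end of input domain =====

-- B replaces A's end-to-front index loop and manual length tiebreak by reversing both
-- words and one built-in lexicographic comparison (idiomatic; same behaviour, incl. None
-- when either word is empty).

-- ===== PORT A =====
-- the for-loop of A: i runs over range(min_len); negative indexing via PySem.List.pyGet?
-- (the 'none' branch is Python's IndexError, unreachable here since -i-1 is always in range)
def wsLoopA (l1 l2 : List Char) (minLen i : Nat) : Option Int :=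
  if _h : i < minLen then
    let idx : Int := -(i : Int) - 1
    match PySem.List.pyGet? l1 idx, PySem.List.pyGet? l2 idx with
    | some c1, some c2 =>
      if c1 = c2 ∧ i + 1 = minLen then
        (if l1.length < l2.length then some 1 else some 2)
      else if c1 = c2 then wsLoopA l1 l2 minLen (i + 1)
      else if c1 < c2 then some 1 else some 2
    | _, _ => none
  else none
termination_by minLen - i

def word_sort (w1 : String) (w2 : String) : Option Int :=
  wsLoopA w1.toList w2.toList (min w1.toList.length w2.toList.length) 0

-- ===== PORT B =====
-- Python's s < t on str is Lean's < on s.toList (PYSEM: code-point lexicographic)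
def word_sort_alt (w1 : String) (w2 : String) : Option Int :=
  if min w1.toList.length w2.toList.length = 0 then none
  else if w1.toList.reverse < w2.toList.reverse then some 1 else some 2

-- ===== PRECONDITION & SPEC =====
def Spec_word_sort (w1 : String) (w2 : String) (out : Option Int) : Prop := out = word_sort_alt w1 w2
instance (w1 : String) (w2 : String) (out : Option Int) : Decidable (Spec_word_sort w1 w2 out) := by unfold Spec_word_sort; infer_instance

-- ===== CLAIM (what is proved, stated in full; the proofs are below) =====
def Claim_equal_word_sort : Prop := ∀ (w1 : String) (w2 : String), Dom_word_sort w1 w2 → Spec_word_sort w1 w2 (word_sort w1 w2)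

-- ===== LEMMAS AND PROOFS =====

-- A's w[-i-1] is the i-th character of the reversed word
theorem pyGet_rev (l : List Char) (i : Nat) (h : i < l.length) :
    PySem.List.pyGet? l (-(i : Int) - 1) = some (l.reverse[i]'(by simpa using h)) := by
  have e : -(i : Int) - 1 = -((i + 1 : Nat) : Int) := by push_cast; ring
  rw [e, PySem.List.pyGet?_neg_natCast _ _ (by omega) (by omega)]
  rw [List.getElem?_eq_getElem (by omega)]
  congr 1
  rw [List.getElem_reverse]
  congr 1
  omega

-- the loop of A, started at i < min_len, is the lexicographic comparison of the
-- reversed words with their first i characters dropped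
theorem loopA_eq (l1 l2 : List Char) (i : Nat) (h : i < min l1.length l2.length) :
    wsLoopA l1 l2 (min l1.length l2.length) i =
      some (if l1.reverse.drop i < l2.reverse.drop i then 1 else 2) := by
  set m := min l1.length l2.length with hm
  have h1 : i < l1.length := lt_of_lt_of_le h (by omega)
  have h2 : i < l2.length := lt_of_lt_of_le h (by omega)
  have hd1 : l1.reverse.drop i = l1.reverse[i]'(by simpa using h1) :: l1.reverse.drop (i + 1) :=
    List.drop_eq_getElem_cons (by simpa using h1)
  have hd2 : l2.reverse.drop i = l2.reverse[i]'(by simpa using h2) :: l2.reverse.drop (i + 1) :=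
    List.drop_eq_getElem_cons (by simpa using h2)
  rw [wsLoopA]
  simp only [h, dif_pos]
  simp only [pyGet_rev l1 i h1, pyGet_rev l2 i h2]
  set c1 := l1.reverse[i]'(by simpa using h1) with hc1
  set c2 := l2.reverse[i]'(by simpa using h2) with hc2
  by_cases hc : c1 = c2
  · by_cases hlast : i + 1 = m
    · rw [if_pos (show c1 = c2 ∧ i + 1 = m from ⟨hc, hlast⟩), hd1, hd2, hc]
      have hdrop : l1.reverse.drop (i + 1) < l2.reverse.drop (i + 1) ↔ l1.length < l2.length := by
        constructor
        · intro hlt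
          by_contra hn
          have e2 : l2.reverse.drop (i + 1) = [] := by
            apply List.drop_eq_nil_of_le; simp; omega
          rw [e2] at hlt
          exact List.not_lt_nil _ hlt
        · intro hlen
          have e1 : l1.reverse.drop (i + 1) = [] := by
            apply List.drop_eq_nil_of_le; simp; omega
          rw [e1]
          cases hne : l2.reverse.drop (i + 1) with
          | nil =>
              have : l2.reverse.length ≤ i + 1 := List.drop_eq_nil_iff.mp hne
              simp at this; omega
          | cons a as => exact List.nil_lt_cons a as
      by_cases hlen : l1.length < l2.length
      · rw [if_pos hlen, if_pos (List.cons_lt_cons_self.mpr (hdrop.mpr hlen))]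
      · rw [if_neg hlen, if_neg (fun h' => hlen (hdrop.mp (List.cons_lt_cons_self.mp h')))]
    · have hi1 : i + 1 < m := by omega
      rw [if_neg (fun hand => hlast hand.2), if_pos hc, loopA_eq l1 l2 (i + 1) hi1,
        hd1, hd2, hc]
      simp only [List.cons_lt_cons_self]
  · rw [if_neg (fun hand => hc hand.1), if_neg hc, hd1, hd2]
    by_cases hlt : c1 < c2
    · rw [if_pos hlt, if_pos (List.cons_lt_cons_iff.mpr (Or.inl hlt))]
    · rw [if_neg hlt, if_neg ?_]
      intro h'
      rcases List.cons_lt_cons_iff.mp h' with h'' | ⟨h'', _⟩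
      · exact hlt h''
      · exact hc h''
termination_by min l1.length l2.length - i

-- ===== VERDICT (by name: the statement is the Claim_ definition above) =====
theorem word_sort_spec : Claim_equal_word_sort := by
  intro w1 w2 _
  unfold Spec_word_sort word_sort word_sort_alt
  by_cases h0 : min w1.toList.length w2.toList.length = 0
  · rw [wsLoopA, dif_neg (by omega), if_pos h0]
  · rw [if_neg h0, loopA_eq _ _ 0 (Nat.pos_of_ne_zero h0)]
    simp only [List.drop_zero]
    split <;> rfl
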